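-- pv_equiv track=rewrite | github.com/vamsid07/interview-agent | src/utils/response_validator.py | _contains_question_marker
-- ===== SOURCE A (Python) =====
-- def _contains_question_marker(text: str) -> bool:
--     if '?' in text:
--         return True
--
--     question_starters = [
--         'tell me', 'describe', 'explain', 'how do you', 'what would',
--         'can you', 'could you', 'walk me through', 'give me an example',
--         'share', 'discuss', 'elaborate'
--     ]
--
--     text_lower = text.lower()
--     return any(text_lower.startswith(starter) or f' {starter}' in text_lower
--                for starter in question_starters)
-- ===== SOURCE B (Python) =====
-- _MARKERS = [
--     'tell me', 'describe', 'explain', 'how do you', 'what would',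
--     'can you', 'could you', 'walk me through', 'give me an example',
--     'share', 'discuss', 'elaborate'
-- ]
--
--
-- def _contains_question_marker(text: str) -> bool:
--     # Single left-to-right scan of the lowercased text: at each position,
--     # stop on a '?', or, at a word boundary (start of string or right after
--     # a space), on any marker starting there.
--     t = text.lower()
--     at_boundary = True
--     for i, c in enumerate(t):
--         if c == '?':
--             return True
--         if at_boundary and any(t.startswith(m, i) for m in _MARKERS):
--             return True
--         at_boundary = (c == ' ')
--     return False
-- ===== Notes on version B (the rewrite author's own statement) =====
-- stated objective: alternative
-- what changed: Replaces the loop over the 12 starters (each doing a startswith plus a full substring search for space+starter) by a single left-to-right scan of the lowercased text that checks for a question mark and, at word boundaries (start or after a space), whether any starter begins there.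
import Mathlib
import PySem

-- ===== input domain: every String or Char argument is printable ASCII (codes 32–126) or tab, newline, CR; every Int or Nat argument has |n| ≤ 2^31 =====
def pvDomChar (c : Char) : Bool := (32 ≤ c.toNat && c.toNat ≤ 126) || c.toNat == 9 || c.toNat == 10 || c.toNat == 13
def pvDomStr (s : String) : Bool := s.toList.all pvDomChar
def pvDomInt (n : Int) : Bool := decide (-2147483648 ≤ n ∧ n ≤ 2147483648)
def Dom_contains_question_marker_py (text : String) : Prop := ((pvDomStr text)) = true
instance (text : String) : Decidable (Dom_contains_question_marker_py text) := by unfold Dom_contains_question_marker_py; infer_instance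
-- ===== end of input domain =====

-- B replaces A's loop over the starters (a startswith plus a substring search per starter)
-- by one left-to-right scan of the lowercased text that checks for a question mark and, at word
-- boundaries (start of string or right after a space), whether any starter begins there.

-- ===== PORT A =====
def pvStarters : List (List Char) :=
  ["tell me".toList, "describe".toList, "explain".toList, "how do you".toList,
   "what would".toList, "can you".toList, "could you".toList, "walk me through".toList,
   "give me an example".toList, "share".toList, "discuss".toList, "elaborate".toList]

def contains_question_marker_py (text : String) : Bool :=
  if PySem.Chars.isIn ['?'] text.toList then true
  else
    let textLower := PySem.Chars.lower text.toList
    pvStarters.any (fun starter =>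
      PySem.Chars.startswith textLower starter ||
      PySem.Chars.isIn (' ' :: starter) textLower)

-- ===== PORT B =====
-- the scan of Source B: atBoundary says position 0 or the previous char is a space
def pvScan (atBoundary : Bool) : List Char → Bool
  | [] => false
  | c :: rest =>
    if c == '?' then true
    else if atBoundary && pvStarters.any (fun m => m.isPrefixOf (c :: rest)) then true
    else pvScan (c == ' ') rest

def contains_question_marker_py_alt (text : String) : Bool :=
  pvScan true (PySem.Chars.lower text.toList)

-- ===== PRECONDITION & SPEC =====
def Spec_contains_question_marker_py (text : String) (out : Bool) : Prop := out = contains_question_marker_py_alt text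
instance (text : String) (out : Bool) : Decidable (Spec_contains_question_marker_py text out) := by unfold Spec_contains_question_marker_py; infer_instance

-- ===== CLAIM (what is proved, stated in full; the proofs are below) =====
def Claim_equal_contains_question_marker_py : Prop := ∀ (text : String), Dom_contains_question_marker_py text → Spec_contains_question_marker_py text (contains_question_marker_py text)

-- ===== LEMMAS AND PROOFS =====

theorem pvStarters_ne_nil : ∀ s ∈ pvStarters, s ≠ [] := by decide

theorem lowerChar_eq_qmark {c : Char} (h : PySem.Chars.lowerChar c = '?') : c = '?' := by
  unfold PySem.Chars.lowerChar at h
  split_ifs at h with hu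
  · exfalso
    unfold PySem.Chars.isupper at hu
    simp only [Bool.and_eq_true, decide_eq_true_eq] at hu
    have h65 : 65 ≤ c.toNat := by
      have h1 := hu.1
      simp only [Char.le_def, UInt32.le_iff_toNat_le] at h1
      exact h1
    have htn := congrArg Char.toNat h
    rw [Char.toNat_ofNat] at htn
    split_ifs at htn with hv
    · have : ('?' : Char).toNat = 63 := by decide
      omega
    · have : ('?' : Char).toNat = 63 := by decide
      omega
  · exact h

theorem mem_qmark_lower {l : List Char} : ('?' ∈ PySem.Chars.lower l) ↔ ('?' ∈ l) := by
  unfold PySem.Chars.lower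
  constructor
  · intro h
    rcases List.mem_map.mp h with ⟨c, hc, he⟩
    rwa [lowerChar_eq_qmark he] at hc
  · intro h
    have hl : PySem.Chars.lowerChar '?' = '?' := by decide
    exact hl ▸ List.mem_map_of_mem h

theorem singleton_infix {c : Char} {l : List Char} : ([c] <:+: l) ↔ c ∈ l := by
  constructor
  · intro h
    exact h.subset (by simp)
  · intro h
    rcases List.append_of_mem h with ⟨s, t, rfl⟩
    exact ⟨s, t, by simp⟩

theorem pvScan_cons (atB : Bool) (c : Char) (rest : List Char) :
    pvScan atB (c :: rest) =
      ((c == '?') || (atB && pvStarters.any (fun m => m.isPrefixOf (c :: rest))) ||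
        pvScan (c == ' ') rest) := by
  cases h1 : (c == '?') with
  | true => simp [pvScan, h1]
  | false =>
    cases h2 : (atB && pvStarters.any (fun m => m.isPrefixOf (c :: rest))) with
    | true => simp [pvScan, h1, h2]
    | false => simp [pvScan, h1, h2]

-- the scan finds exactly: a '?', a starter at the current boundary, or a starter after a space
theorem pvScan_iff (l : List Char) : ∀ atB : Bool,
    pvScan atB l = true ↔
      ('?' ∈ l) ∨ (atB = true ∧ ∃ s ∈ pvStarters, s <+: l) ∨
        (∃ s ∈ pvStarters, (' ' :: s) <:+: l) := by
  induction l with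
  | nil =>
    intro atB
    simp only [show pvScan atB [] = false from rfl, Bool.false_eq_true, false_iff]
    rintro (h | ⟨_, s, hs, hp⟩ | ⟨s, hs, hi⟩)
    · simp at h
    · exact pvStarters_ne_nil s hs (List.prefix_nil.mp hp)
    · simpa using List.infix_nil.mp hi
  | cons c rest ih =>
    intro atB
    rw [pvScan_cons]
    simp only [Bool.or_eq_true, Bool.and_eq_true, List.any_eq_true, beq_iff_eq,
      List.isPrefixOf_iff_prefix, ih]
    constructor
    · rintro ((hc | ⟨hB, s, hs, hp⟩) | h | ⟨hsp, s, hs, hp⟩ | ⟨s, hs, hi⟩)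
      · exact Or.inl (by simp [hc])
      · exact Or.inr (Or.inl ⟨hB, s, hs, hp⟩)
      · exact Or.inl (List.mem_cons_of_mem _ h)
      · refine Or.inr (Or.inr ⟨s, hs, List.infix_cons_iff.mpr (Or.inl ?_)⟩)
        exact List.cons_prefix_cons.mpr ⟨hsp.symm, hp⟩
      · exact Or.inr (Or.inr ⟨s, hs, List.infix_cons_iff.mpr (Or.inr hi)⟩)
    · rintro (h | ⟨hB, s, hs, hp⟩ | ⟨s, hs, hi⟩)
      · rcases List.mem_cons.mp h with h | h
        · exact Or.inl (Or.inl h.symm)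
        · exact Or.inr (Or.inl h)
      · exact Or.inl (Or.inr ⟨hB, s, hs, hp⟩)
      · rcases List.infix_cons_iff.mp hi with h | h
        · rcases List.cons_prefix_cons.mp h with ⟨hc, hp⟩
          exact Or.inr (Or.inr (Or.inl ⟨hc.symm, s, hs, hp⟩))
        · exact Or.inr (Or.inr (Or.inr ⟨s, hs, h⟩))

-- ===== VERDICT (by name: the statement is the Claim_ definition above) =====
theorem contains_question_marker_py_spec : Claim_equal_contains_question_marker_py := by
  intro text _
  show contains_question_marker_py text = contains_question_marker_py_alt text
  unfold contains_question_marker_py contains_question_marker_py_alt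
  by_cases hq : PySem.Chars.isIn ['?'] text.toList = true
  · rw [if_pos hq]
    symm
    rw [pvScan_iff]
    exact Or.inl (mem_qmark_lower.mpr (singleton_infix.mp ((PySem.Chars.isIn_iff_infix _ _).mp hq)))
  · rw [if_neg hq]
    show (pvStarters.any fun starter =>
        PySem.Chars.startswith (PySem.Chars.lower text.toList) starter ||
        PySem.Chars.isIn (' ' :: starter) (PySem.Chars.lower text.toList)) =
      pvScan true (PySem.Chars.lower text.toList)
    have hnm : '?' ∉ PySem.Chars.lower text.toList := fun hmem =>
      hq ((PySem.Chars.isIn_iff_infix _ _).mpr (singleton_infix.mpr (mem_qmark_lower.mp hmem)))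
    cases h : pvScan true (PySem.Chars.lower text.toList) with
    | true =>
      rw [pvScan_iff] at h
      simp only [List.any_eq_true, Bool.or_eq_true]
      rcases h with h | ⟨_, s, hs, hp⟩ | ⟨s, hs, hi⟩
      · exact absurd h hnm
      · exact ⟨s, hs, Or.inl ((PySem.Chars.startswith_iff _ _).mpr hp)⟩
      · exact ⟨s, hs, Or.inr ((PySem.Chars.isIn_iff_infix _ _).mpr hi)⟩
    | false =>
      cases han : (pvStarters.any fun starter =>
          PySem.Chars.startswith (PySem.Chars.lower text.toList) starter ||
          PySem.Chars.isIn (' ' :: starter) (PySem.Chars.lower text.toList)) with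
      | false => rfl
      | true =>
        exfalso
        simp only [List.any_eq_true, Bool.or_eq_true] at han
        rcases han with ⟨s, hs, hpre | hin⟩
        · have hT : pvScan true (PySem.Chars.lower text.toList) = true := by
            rw [pvScan_iff]
            exact Or.inr (Or.inl ⟨rfl, s, hs, (PySem.Chars.startswith_iff _ _).mp hpre⟩)
          rw [hT] at h; exact Bool.noConfusion h
        · have hT : pvScan true (PySem.Chars.lower text.toList) = true := by
            rw [pvScan_iff]
            exact Or.inr (Or.inr ⟨s, hs, (PySem.Chars.isIn_iff_infix _ _).mp hin⟩)
          rw [hT] at h; exact Bool.noConfusion h
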